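-- pv_equiv track=rewrite | github.com/Wtrwx/logos-format | logos-format.py | fix_split_c_expressions
-- ===== SOURCE A (Python) =====
-- def fix_split_c_expressions(lines):
--     """修复被分割到多行的 @logosformatc_ 表达式"""
--     result = []
--     i = 0
--     while i < len(lines):
--         current_line = lines[i]
--
--         # 检查是否有不完整的 @logosformatc_ 表达式
--         if "@logosformatc_" in current_line and current_line.strip().endswith("[["):
--             # 这可能是一个被拆分的 %c 表达式的开始
--             combined_line = current_line
--             j = i + 1
--
--             # 尝试向后找到表达式的其余部分
--             while j < len(lines) and "alloc]" in lines[j]: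
--                 combined_line += " " + lines[j].strip()
--                 j += 1
--
--             # 添加组合的行并跳过已处理的行
--             result.append(combined_line)
--             i = j
--         else:
--             result.append(current_line)
--             i += 1
--
--     return result
-- ===== SOURCE B (Python) =====
-- def fix_split_c_expressions(lines):
--     """One forward pass: a 'merging' flag and a 'combined' accumulator replace A's index jumping."""
--     result = []
--     merging = False
--     combined = ""
--     for line in lines:
--         if merging:
--             if "alloc]" in line:
--                 combined += " " + line.strip()
--                 continue
--             result.append(combined)
--             merging = False
--         if "@logosformatc_" in line and line.strip().endswith("[["):
--             combined = line
--             merging = True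
--         else:
--             result.append(line)
--     if merging:
--         result.append(combined)
--     return result
-- ===== Notes on version B (the rewrite author's own statement) =====
-- stated objective: alternative
-- what changed: Replaced A's index-jumping while loop with a nested consuming scan by a single forward fold over the lines carrying a 'merging' flag and a 'combined' accumulator, flushing the pending merge after the loop.
import Mathlib
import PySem

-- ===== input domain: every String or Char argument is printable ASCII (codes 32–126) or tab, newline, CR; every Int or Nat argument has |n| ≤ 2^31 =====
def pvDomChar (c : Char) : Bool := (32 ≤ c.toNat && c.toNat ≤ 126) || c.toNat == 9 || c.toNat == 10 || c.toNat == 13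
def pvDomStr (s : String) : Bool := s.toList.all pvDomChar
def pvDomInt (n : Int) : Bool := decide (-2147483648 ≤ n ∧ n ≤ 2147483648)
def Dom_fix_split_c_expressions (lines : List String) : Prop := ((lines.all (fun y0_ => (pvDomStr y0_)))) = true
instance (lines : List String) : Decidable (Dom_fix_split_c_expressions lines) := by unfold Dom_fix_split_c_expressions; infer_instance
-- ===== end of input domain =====

-- B replaces A's index-jumping loop with a single forward fold over the lines carrying a
-- 'merging' flag and a pending 'combined' line (alternative decomposition, same cost).

-- ===== PORT A =====
-- shared condition: "@logosformatc_" in line and line.strip().endswith("[[")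
def pvIsStart (l : String) : Bool :=
  PySem.Str.isIn "@logosformatc_" l && PySem.Str.endswith (PySem.Str.strip l) "[["

-- A's inner while loop: combined_line += " " + lines[j].strip() while "alloc]" in lines[j]
def pvConsumeA (c : String) : List String → String × List String
  | [] => (c, [])
  | l :: rest =>
    if PySem.Str.isIn "alloc]" l then pvConsumeA (c ++ " " ++ PySem.Str.strip l) rest
    else (c, l :: rest)

theorem pvConsumeA_len (c : String) (ls : List String) :
    (pvConsumeA c ls).2.length ≤ ls.length := by
  induction ls generalizing c with
  | nil => simp [pvConsumeA]
  | cons l rest ih =>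
    simp only [pvConsumeA]
    split
    · exact le_trans (ih _) (Nat.le_succ _)
    · simp

def fix_split_c_expressions (lines : List String) : List String :=
  match lines with
  | [] => []
  | l :: rest =>
    if pvIsStart l then
      let p := pvConsumeA l rest
      p.1 :: fix_split_c_expressions p.2
    else l :: fix_split_c_expressions rest
termination_by lines.length
decreasing_by
  · exact Nat.lt_succ_of_le (pvConsumeA_len l rest)
  · simp

-- ===== PORT B =====
-- one step of B's for-loop over (result, merging, combined)
def pvStepB (st : List String × Bool × String) (line : String) : List String × Bool × String :=
  if st.2.1 && PySem.Str.isIn "alloc]" line then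
    (st.1, true, st.2.2 ++ " " ++ PySem.Str.strip line)
  else
    let res := if st.2.1 then st.1 ++ [st.2.2] else st.1
    if pvIsStart line then (res, true, line) else (res ++ [line], false, "")

def fix_split_c_expressions_alt (lines : List String) : List String :=
  let st := lines.foldl pvStepB ([], false, "")
  if st.2.1 then st.1 ++ [st.2.2] else st.1

-- ===== PRECONDITION & SPEC =====
def Spec_fix_split_c_expressions (lines : List String) (out : List String) : Prop := out = fix_split_c_expressions_alt lines
instance (lines : List String) (out : List String) : Decidable (Spec_fix_split_c_expressions lines out) := by unfold Spec_fix_split_c_expressions; infer_instance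

-- ===== CLAIM (what is proved, stated in full; the proofs are below) =====
def Claim_equal_fix_split_c_expressions : Prop := ∀ (lines : List String), Dom_fix_split_c_expressions lines → Spec_fix_split_c_expressions lines (fix_split_c_expressions lines)

-- ===== LEMMAS AND PROOFS =====

-- the final flush of B
def pvFinish (st : List String × Bool × String) : List String :=
  if st.2.1 then st.1 ++ [st.2.2] else st.1

-- folding B in merging state runs exactly A's inner consuming loop
theorem pvFoldB_merge (ls : List String) (c : String) (res : List String) :
    ls.foldl pvStepB (res, true, c)
      = (pvConsumeA c ls).2.foldl pvStepB (res, true, (pvConsumeA c ls).1) := by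
  induction ls generalizing c with
  | nil => simp [pvConsumeA]
  | cons l rest ih =>
    cases h : PySem.Str.isIn "alloc]" l with
    | true =>
      simp only [pvConsumeA, h, if_pos, List.foldl_cons]
      have hs : pvStepB (res, true, c) l = (res, true, c ++ " " ++ PySem.Str.strip l) := by
        simp only [pvStepB]
        rw [if_pos (by simpa using h)]
      rw [hs, ih]
    | false =>
      simp only [pvConsumeA, h, Bool.false_eq_true, if_false]

theorem pvConsumeA_head_no_alloc (c : String) (ls : List String) (m : String) (rem : List String)
    (h : (pvConsumeA c ls).2 = m :: rem) : PySem.Str.isIn "alloc]" m = false := by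
  induction ls generalizing c with
  | nil => simp [pvConsumeA] at h
  | cons l rest ih =>
    simp only [pvConsumeA] at h
    split at h
    · exact ih _ h
    · rename_i hl
      cases h
      simpa using hl

theorem pvMain (n : Nat) (ls : List String) (hn : ls.length ≤ n) (res : List String) (s : String) :
    pvFinish (ls.foldl pvStepB (res, false, s)) = res ++ fix_split_c_expressions ls := by
  induction n generalizing ls res s with
  | zero =>
    have : ls = [] := List.eq_nil_of_length_eq_zero (Nat.le_zero.mp hn)
    subst this
    simp [pvFinish, fix_split_c_expressions]
  | succ n ih =>
    cases ls with
    | nil => simp [pvFinish, fix_split_c_expressions]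
    | cons l rest =>
      have hrest : rest.length ≤ n := Nat.lt_succ_iff.mp (by simpa using hn)
      by_cases hst : pvIsStart l = true
      · have hs : pvStepB (res, false, s) l = (res, true, l) := by
          simp [pvStepB, hst]
        rw [List.foldl_cons, hs, pvFoldB_merge]
        rcases hrem : (pvConsumeA l rest).2 with _ | ⟨m, rem'⟩
        · have hfix : fix_split_c_expressions (l :: rest)
              = (pvConsumeA l rest).1 :: fix_split_c_expressions (pvConsumeA l rest).2 := by
            rw [fix_split_c_expressions]; simp [hst]
          rw [hfix, hrem]
          simp [pvFinish, fix_split_c_expressions]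
        · have hm : PySem.Str.isIn "alloc]" m = false :=
            pvConsumeA_head_no_alloc l rest m rem' hrem
          rw [List.foldl_cons]
          have hm' : PySem.Chars.isIn ['a','l','l','o','c',']'] m.toList = false := by simpa using hm
          have hs1 : pvStepB (res, true, (pvConsumeA l rest).1) m
              = pvStepB (res ++ [(pvConsumeA l rest).1], false, "") m := by
            simp [pvStepB, hm']
          rw [hs1, ← List.foldl_cons]
          have hlen : (m :: rem').length ≤ n := by
            have := pvConsumeA_len l rest
            rw [hrem] at this
            omega
          rw [ih (m :: rem') hlen]
          have hfix : fix_split_c_expressions (l :: rest)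
              = (pvConsumeA l rest).1 :: fix_split_c_expressions (pvConsumeA l rest).2 := by
            rw [fix_split_c_expressions]; simp [hst]
          rw [hfix, hrem]
          simp
      · have hs : pvStepB (res, false, s) l = (res ++ [l], false, "") := by
          simp [pvStepB, hst]
        rw [List.foldl_cons, hs, ih rest hrest]
        have hfix : fix_split_c_expressions (l :: rest)
            = l :: fix_split_c_expressions rest := by
          rw [fix_split_c_expressions]; simp [hst]
        rw [hfix]
        simp

-- ===== VERDICT (by name: the statement is the Claim_ definition above) =====
theorem fix_split_c_expressions_spec : Claim_equal_fix_split_c_expressions := by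
  intro lines _
  unfold Spec_fix_split_c_expressions fix_split_c_expressions_alt
  have := pvMain lines.length lines (le_refl _) [] ""
  simpa [pvFinish] using this.symm
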